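-- pv_equiv track=rewrite | github.com/Tanmay53/cohort_3 | submissions/sm_102_amit/week_14/day_3/evaluation/brick_wall.py | odd_row
-- ===== SOURCE A (Python) =====
-- def odd_row(width):
--     wall = ""
--     for w in range(width):
--         if w == 0:
--             wall += "__|"
--         else:
--             wall += "___|"
--     wall += "__"
--     return wall
-- ===== SOURCE B (Python) =====
-- def odd_row(width):
--     if width < 1:
--         return "__"
--     return "__|" + "___|" * (width - 1) + "__"
-- ===== Notes on version B (the rewrite author's own statement) =====
-- stated objective: idiomatic
-- what changed: Replaces the accumulation loop over range(width) with a single closed-form expression using string repetition, guarding width < 1.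
import Mathlib
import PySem

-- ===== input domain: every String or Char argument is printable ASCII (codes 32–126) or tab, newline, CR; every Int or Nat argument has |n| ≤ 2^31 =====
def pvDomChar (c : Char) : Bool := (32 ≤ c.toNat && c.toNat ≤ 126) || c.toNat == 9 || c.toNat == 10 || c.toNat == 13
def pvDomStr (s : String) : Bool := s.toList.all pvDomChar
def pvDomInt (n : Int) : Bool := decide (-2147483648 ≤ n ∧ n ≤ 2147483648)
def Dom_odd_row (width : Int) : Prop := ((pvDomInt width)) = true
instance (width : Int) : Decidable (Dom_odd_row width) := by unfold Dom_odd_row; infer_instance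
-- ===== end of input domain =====

-- B builds the row in one closed-form expression (guard + string repetition) instead of A's accumulation loop.

-- ===== PORT A =====
-- strings are handled as List Char (PySem convention); the loop is the foldl over range(width)
def odd_row (width : Int) : String :=
  let wall : List Char := []
  let wall := (PySem.List.pyRange 0 width 1).foldl
    (fun wall w => if w == 0 then wall ++ "__|".toList else wall ++ "___|".toList) wall
  let wall := wall ++ "__".toList
  String.mk wall

-- ===== PORT B =====
-- '"___|" * (width - 1)' is (List.replicate (width-1).toNat "___|".toList).flatten
def odd_row_alt (width : Int) : String :=
  if width < 1 then "__"
  else String.mk ("__|".toList ++ (List.replicate (width - 1).toNat "___|".toList).flatten ++ "__".toList)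

-- ===== PRECONDITION & SPEC =====
def Spec_odd_row (width : Int) (out : String) : Prop := out = odd_row_alt width
instance (width : Int) (out : String) : Decidable (Spec_odd_row width out) := by unfold Spec_odd_row; infer_instance

-- ===== CLAIM (what is proved, stated in full; the proofs are below) =====
def Claim_equal_odd_row : Prop := ∀ (width : Int), Dom_odd_row width → Spec_odd_row width (odd_row width)

-- ===== LEMMAS AND PROOFS =====

-- A's loop, run over any list of nonzero indices, appends one "___|" per element
lemma odd_row_fold_ne_zero (l : List Int) (acc : List Char) (h : ∀ w ∈ l, w ≠ 0) :
    l.foldl (fun wall w => if w == 0 then wall ++ "__|".toList else wall ++ "___|".toList) acc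
    = acc ++ (List.replicate l.length "___|".toList).flatten := by
  induction l generalizing acc with
  | nil => simp
  | cons x xs ih =>
    have hx : (x == 0) = false := by simpa using h x (by simp)
    simp only [List.foldl_cons, hx, List.length_cons, List.replicate_succ, List.flatten_cons]
    rw [ih _ (fun w hw => h w (by simp [hw]))]
    simp

-- ===== VERDICT (by name: the statement is the Claim_ definition above) =====

theorem odd_row_spec : Claim_equal_odd_row := by
  intro width _
  unfold Spec_odd_row odd_row odd_row_alt
  rw [PySem.List.pyRange_one]
  by_cases h : width < 1
  · have h0 : (width - 0).toNat = 0 := by omega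
    rw [h0, if_pos h]
    rfl
  · have hn : (width - 0).toNat = (width - 1).toNat + 1 := by omega
    rw [hn, List.range_succ_eq_map]
    simp only [List.map_cons, List.foldl_cons, List.map_map, Nat.cast_zero, add_zero,
      BEq.rfl, if_true, List.nil_append]
    rw [odd_row_fold_ne_zero _ _ (by
      intro w hw
      simp only [List.mem_map, Function.comp] at hw
      obtain ⟨k, _, hk⟩ := hw
      omega)]
    simp [h]
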